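-- pv_equiv track=rewrite | github.com/khamis2000/basictime | wordcount.py | hash_table_count_words
-- ===== SOURCE A (Python) =====
-- def hash_table_count_words(text):
--     words = text.split()
--     count = {}
--     for word in words:
--         if word in count:
--             count[word] += 1
--         else:
--             count[word] = 1
--     return count
-- ===== SOURCE B (Python) =====
-- def hash_table_count_words(text):
--     words = text.split()
--     return {w: words.count(w) for w in dict.fromkeys(words)}
-- ===== Notes on version B (the rewrite author's own statement) =====
-- stated objective: simpler
-- what changed: Replaces the incremental membership-test/increment dict loop with ordered deduplication (dict.fromkeys) followed by one words.count per distinct word, built as a comprehension.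
import Mathlib
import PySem

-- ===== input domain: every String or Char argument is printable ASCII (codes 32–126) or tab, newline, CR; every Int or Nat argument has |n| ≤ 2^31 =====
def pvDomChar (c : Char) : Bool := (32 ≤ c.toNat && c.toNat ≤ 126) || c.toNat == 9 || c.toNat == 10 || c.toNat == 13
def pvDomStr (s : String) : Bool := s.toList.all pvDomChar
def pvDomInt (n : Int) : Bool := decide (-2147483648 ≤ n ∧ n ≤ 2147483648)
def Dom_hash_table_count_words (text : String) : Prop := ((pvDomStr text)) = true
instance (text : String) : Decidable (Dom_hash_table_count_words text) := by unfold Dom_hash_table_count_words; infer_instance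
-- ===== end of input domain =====

-- B replaces A's incremental membership-test/increment dict loop by ordered dedup + one count per
-- distinct word (objective: simpler; not faster).

-- ===== PORT A =====
-- words = text.split(); for word in words: if word in count: count[word] += 1 else: count[word] = 1
def hash_table_count_words (text : String) : List (String × Int) :=
  let words := PySem.Str.split₀ text
  (words.foldl
    (fun count word =>
      if count.contains word then count.modify word 0 (· + 1)
      else count.insert word 1)
    (PySem.Dict.empty : PySem.Dict String Int)).items

-- ===== PORT B =====
-- words = text.split(); {w: words.count(w) for w in dict.fromkeys(words)}
def hash_table_count_words_alt (text : String) : List (String × Int) :=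
  let words := PySem.Str.split₀ text
  (PySem.List.dedup words).map (fun w => (w, (words.count w : Int)))

-- ===== PRECONDITION & SPEC =====
def Spec_hash_table_count_words (text : String) (out : List (String × Int)) : Prop := out = hash_table_count_words_alt text
instance (text : String) (out : List (String × Int)) : Decidable (Spec_hash_table_count_words text out) := by unfold Spec_hash_table_count_words; infer_instance

-- ===== CLAIM (what is proved, stated in full; the proofs are below) =====
def Claim_equal_hash_table_count_words : Prop := ∀ (text : String), Dom_hash_table_count_words text → Spec_hash_table_count_words text (hash_table_count_words text)

-- ===== LEMMAS AND PROOFS =====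

-- A's branch 'if word in count: count[word] += 1 else: count[word] = 1' is, in both cases,
-- an insert of getD + 1 (when the key is absent, getD returns the default 0).
lemma count_step_eq (d : PySem.Dict String Int) (w : String) :
    (if d.contains w then d.modify w 0 (· + 1) else d.insert w 1)
      = d.insert w (d.getD w 0 + 1) := by
  by_cases h : d.contains w = true
  · simp [h, PySem.Dict.modify]
  · simp only [Bool.not_eq_true] at h
    have h0 : d.getD w 0 = 0 := by
      simp only [PySem.Dict.contains, List.any_eq_false, beq_iff_eq, Prod.forall] at h
      have hn : List.find? (fun p => p.1 == w) d.items = none :=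
        List.find?_eq_none.mpr (fun p hp => by simpa using fun hb => h p.1 p.2 hp hb)
      simp [PySem.Dict.getD, PySem.Dict.get?, hn]
    simp [h, h0]

-- ===== VERDICT (by name: the statement is the Claim_ definition above) =====
theorem hash_table_count_words_spec : Claim_equal_hash_table_count_words := by
  intro text _
  unfold Spec_hash_table_count_words hash_table_count_words hash_table_count_words_alt
  show ((PySem.Str.split₀ text).foldl
      (fun count word =>
        if count.contains word then count.modify word 0 (· + 1)
        else count.insert word 1)
      (PySem.Dict.empty : PySem.Dict String Int)).items
    = (PySem.List.dedup (PySem.Str.split₀ text)).map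
        (fun w => (w, ((PySem.Str.split₀ text).count w : Int)))
  have hfun : (fun (count : PySem.Dict String Int) (word : String) =>
        if count.contains word then count.modify word 0 (· + 1)
        else count.insert word 1)
      = fun d w => d.insert w (d.getD w 0 + 1) := by
    funext d w; exact count_step_eq d w
  rw [hfun, PySem.Dict.foldl_insert_getD_add_one_eq_counter,
      PySem.Dict.items_counter, PySem.List.dedup_eq_ofList]
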